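-- pv_equiv track=rewrite | github.com/hghyhghy/Codechef-Coding-Ninja | Desktop/DSA/T92/nextgreaterelementinsecondlist.py | next_greater_element_in_second_array
-- ===== SOURCE A (Python) =====
-- def next_greater_element_in_second_array(array1:list[int],array2:list[int])->list[int]:
--
--     n=len(array1)
--     m=len(array2)
--
--     result=[]
--
--
--     for i in range(n):
--
--         found=False
--
--         for j in range(m):
--
--             if array1[i] ==  array2[j]:
--
--                 for k in range(j+1,m):
--
--                     if array2[k]>array2[j]:
--
--                         result.append(array2[k])
--                         found=True
--                         break
--
--                 if not found:
--
--                     result.append(-1)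
--
--                 break
--
--     return result
-- ===== SOURCE B (Python) =====
-- def next_greater_element_in_second_array(array1: list[int], array2: list[int]) -> list[int]:
--     # Build, in one pass over array2, a map from each distinct value (at its first
--     # occurrence) to the first strictly greater value after that occurrence (-1 if none);
--     # then answer every array1 query by a dict lookup (values absent from array2 yield nothing).
--     nge = {}
--     for j, v in enumerate(array2):
--         if v not in nge:
--             nge[v] = next((w for w in array2[j + 1:] if w > v), -1)
--     return [nge[x] for x in array1 if x in nge]
-- ===== Notes on version B (the rewrite author's own statement) =====
-- stated objective: faster
-- what changed: A rescans array2 for every array1 element (find the first occurrence, then scan right for a greater value); B builds a dict mapping each distinct array2 value to its next-greater answer in one pass over array2 (computing the suffix scan only once per distinct value, at its first occurrence) and then answers every array1 query by a single dict lookup.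
import Mathlib
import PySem

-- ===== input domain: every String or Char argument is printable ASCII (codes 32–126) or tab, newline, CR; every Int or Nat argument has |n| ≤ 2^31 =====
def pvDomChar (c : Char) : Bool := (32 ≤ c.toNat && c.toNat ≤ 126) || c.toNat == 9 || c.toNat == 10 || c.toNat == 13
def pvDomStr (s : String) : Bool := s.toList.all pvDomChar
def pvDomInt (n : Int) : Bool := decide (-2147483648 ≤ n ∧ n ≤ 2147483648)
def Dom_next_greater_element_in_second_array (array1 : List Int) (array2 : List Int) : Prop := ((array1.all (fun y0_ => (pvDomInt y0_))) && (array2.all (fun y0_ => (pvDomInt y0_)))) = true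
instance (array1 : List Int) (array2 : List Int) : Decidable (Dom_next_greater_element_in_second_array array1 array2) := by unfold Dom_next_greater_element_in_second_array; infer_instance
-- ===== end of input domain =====

-- B replaces A's per-query rescans of array2 by a dict (value → next-greater at its first
-- occurrence) built in one pass over array2, answering each array1 query by a lookup.

-- ===== PORT A =====
-- inner 'for k in range(j+1, m): if array2[k] > array2[j]: append & break' — some vk = appended value (break), none = loop ended
def pvA_loopK (array2 : List Int) (vj : Int) : List Int → Option Int
  | [] => none
  | k :: ks =>
    let vk := PySem.List.pyGetD array2 k 0   -- indices come from range(j+1, m): always in range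
    if vk > vj then some vk else pvA_loopK array2 vj ks

-- middle 'for j in range(m)' with its break: returns the items appended for this i
def pvA_loopJ (array2 : List Int) (x : Int) (m : Int) : List Int → List Int
  | [] => []
  | j :: js =>
    let vj := PySem.List.pyGetD array2 j 0   -- indices come from range(m): always in range
    if x == vj then
      match pvA_loopK array2 vj (PySem.List.pyRange (j + 1) m 1) with
      | some vk => [vk]          -- found=True, appended array2[k], break
      | none => [-1]             -- not found: append -1, break
    else pvA_loopJ array2 x m js

def next_greater_element_in_second_array (array1 : List Int) (array2 : List Int) : List Int :=
  let n : Int := array1.length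
  let m : Int := array2.length
  (PySem.List.pyRange 0 n 1).foldl
    (fun result i =>
      result ++ pvA_loopJ array2 (PySem.List.pyGetD array1 i 0) m (PySem.List.pyRange 0 m 1))
    []

-- ===== PORT B =====
-- next((w for w in suffix if w > v), -1)
def pvB_firstGreater (v : Int) : List Int → Int
  | [] => -1
  | w :: ws => if w > v then w else pvB_firstGreater v ws

def next_greater_element_in_second_array_alt (array1 : List Int) (array2 : List Int) : List Int :=
  let nge : PySem.Dict Int Int :=
    (PySem.List.enumerate array2 0).foldl
      (fun d p =>
        if PySem.Dict.contains d p.2 then d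
        else PySem.Dict.insert d p.2
          (pvB_firstGreater p.2 (PySem.List.slice array2 (some (p.1 + 1)) none)))
      PySem.Dict.empty
  array1.filterMap (fun x => PySem.Dict.get? nge x)

-- ===== PRECONDITION & SPEC =====
def Spec_next_greater_element_in_second_array (array1 : List Int) (array2 : List Int) (out : List Int) : Prop := out = next_greater_element_in_second_array_alt array1 array2
instance (array1 : List Int) (array2 : List Int) (out : List Int) : Decidable (Spec_next_greater_element_in_second_array array1 array2 out) := by unfold Spec_next_greater_element_in_second_array; infer_instance

-- ===== CLAIM (what is proved, stated in full; the proofs are below) =====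
def Claim_equal_next_greater_element_in_second_array : Prop := ∀ (array1 : List Int) (array2 : List Int), Dom_next_greater_element_in_second_array array1 array2 → Spec_next_greater_element_in_second_array array1 array2 (next_greater_element_in_second_array array1 array2)

-- ===== LEMMAS AND PROOFS =====

-- the per-query answer both programs compute: none if x ∉ l, else the first value
-- after the first occurrence of x that exceeds it (-1 if there is none)
def pvH (x : Int) : List Int → Option Int
  | [] => none
  | v :: rest => if x = v then some (pvB_firstGreater v rest) else pvH x rest

-- A's inner k-loop over range(i, m) scans the suffix a2.drop i for the first value > v
theorem pvA_loopK_eq (a2 : List Int) (v : Int) :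
    ∀ (n i : Nat), a2.length ≤ i + n →
      (match pvA_loopK a2 v (PySem.List.pyRange (i : Int) (a2.length : Int) 1) with
        | some vk => [vk]
        | none => [(-1 : Int)]) = [pvB_firstGreater v (a2.drop i)] := by
  intro n
  induction n with
  | zero =>
    intro i h
    rw [PySem.List.pyRange_one_eq_nil (by exact_mod_cast h), List.drop_eq_nil_of_le (by omega)]
    rfl
  | succ n ih =>
    intro i h
    by_cases hi : i < a2.length
    · rw [PySem.List.pyRange_one_cons (by exact_mod_cast hi)]
      have hd : a2.drop i = a2[i] :: a2.drop (i + 1) := List.drop_eq_getElem_cons hi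
      simp only [pvA_loopK, PySem.List.pyGetD_natCast, List.getD_eq_getElem _ _ hi, hd]
      by_cases hg : a2[i] > v
      · simp [hg, pvB_firstGreater]
      · have := ih (i + 1) (by omega)
        simp only [hg, if_false, pvB_firstGreater]
        rw [show ((i : Int) + 1) = ((i + 1 : Nat) : Int) by push_cast; ring]
        simpa [hg] using this
    · rw [PySem.List.pyRange_one_eq_nil (by exact_mod_cast Nat.le_of_not_lt hi),
        List.drop_eq_nil_of_le (by omega)]
      rfl

-- A's middle j-loop over range(i, m) computes pvH on the suffix a2.drop i
theorem pvA_loopJ_eq (a2 : List Int) (x : Int) :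
    ∀ (n i : Nat), a2.length ≤ i + n →
      pvA_loopJ a2 x (a2.length : Int) (PySem.List.pyRange (i : Int) (a2.length : Int) 1)
        = ((pvH x (a2.drop i)).map (fun r => [r])).getD [] := by
  intro n
  induction n with
  | zero =>
    intro i h
    rw [PySem.List.pyRange_one_eq_nil (by exact_mod_cast h), List.drop_eq_nil_of_le (by omega)]
    rfl
  | succ n ih =>
    intro i h
    by_cases hi : i < a2.length
    · rw [PySem.List.pyRange_one_cons (by exact_mod_cast hi)]
      have hd : a2.drop i = a2[i] :: a2.drop (i + 1) := List.drop_eq_getElem_cons hi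
      rw [hd]
      simp only [pvA_loopJ, PySem.List.pyGetD_natCast, List.getD_eq_getElem _ _ hi]
      rw [show ((i : Int) + 1) = ((i + 1 : Nat) : Int) by push_cast; ring]
      by_cases hx : x = a2[i]
      · have hbx : (x == a2[i]) = true := by simp [hx]
        simp only [hbx, if_true, pvH, if_pos hx]
        rw [pvA_loopK_eq a2 (a2[i]) n (i + 1) (by omega)]
        rfl
      · have hbx : (x == a2[i]) = false := by simp [hx]
        simp only [hbx, Bool.false_eq_true, if_false, pvH, if_neg hx]
        exact ih (i + 1) (by omega)
    · rw [PySem.List.pyRange_one_eq_nil (by exact_mod_cast Nat.le_of_not_lt hi),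
        List.drop_eq_nil_of_le (by omega)]
      rfl

-- B's dict-building loop, run on the suffix of a2 from position j, binds each still-unbound
-- value to its pvH answer on that suffix; existing bindings win.
theorem pvB_build_eq (a2 : List Int) :
    ∀ (n j : Nat) (d : PySem.Dict Int Int) (x : Int), a2.length ≤ j + n →
      PySem.Dict.get?
        ((PySem.List.enumerate (a2.drop j) (j : Int)).foldl
          (fun d p =>
            if PySem.Dict.contains d p.2 then d
            else PySem.Dict.insert d p.2
              (pvB_firstGreater p.2 (PySem.List.slice a2 (some (p.1 + 1)) none))) d) x
        = (PySem.Dict.get? d x).or (pvH x (a2.drop j)) := by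
  intro n
  induction n with
  | zero =>
    intro j d x h
    rw [List.drop_eq_nil_of_le (by omega)]
    simp [PySem.List.enumerate_nil, pvH]
  | succ n ih =>
    intro j d x h
    by_cases hj : j < a2.length
    · have hd : a2.drop j = a2[j] :: a2.drop (j + 1) := List.drop_eq_getElem_cons hj
      rw [hd, PySem.List.enumerate_cons]
      have hslice : PySem.List.slice a2 (some ((j : Int) + 1)) none = a2.drop (j + 1) := by
        rw [show ((j : Int) + 1) = ((j + 1 : Nat) : Int) by push_cast; ring]
        exact PySem.List.slice_from_natCast a2 (j + 1)
      simp only [List.foldl_cons, hslice]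
      rw [show ((j : Int) + 1) = ((j + 1 : Nat) : Int) by push_cast; ring]
      by_cases hc : PySem.Dict.contains d (a2[j]) = true
      · rw [if_pos hc, ih (j + 1) d x (by omega)]
        by_cases hx : x = a2[j]
        · have hs : (PySem.Dict.get? d x).isSome := by
            rw [hx, ← PySem.Dict.contains_eq_isSome_get?]; exact hc
          obtain ⟨y, hy⟩ := Option.isSome_iff_exists.mp hs
          rw [hy]; rfl
        · simp only [pvH, if_neg hx]
      · rw [if_neg hc, ih (j + 1) _ x (by omega)]
        by_cases hx : x = a2[j]
        · subst hx
          have hnone : PySem.Dict.get? d (a2[j]) = none := by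
            rw [PySem.Dict.get?_eq_none_iff_contains]; simpa using hc
          rw [PySem.Dict.get?_insert_self, hnone]
          simp [pvH]
        · rw [PySem.Dict.get?_insert, if_neg hx]
          simp only [pvH, if_neg hx]
    · rw [List.drop_eq_nil_of_le (by omega)]
      simp [PySem.List.enumerate_nil, pvH]

theorem pvB_lookup (a2 : List Int) (x : Int) :
    PySem.Dict.get?
      ((PySem.List.enumerate a2 0).foldl
        (fun d p =>
          if PySem.Dict.contains d p.2 then d
          else PySem.Dict.insert d p.2
            (pvB_firstGreater p.2 (PySem.List.slice a2 (some (p.1 + 1)) none)))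
        PySem.Dict.empty) x = pvH x a2 := by
  have := pvB_build_eq a2 a2.length 0 PySem.Dict.empty x (by omega)
  simpa [PySem.Dict.get?_empty] using this

-- fold/flatMap over array1 versus filterMap over array1 of the same per-query answer
theorem pv_list_eq (a2 : List Int) :
    ∀ (a1 : List Int),
      a1.flatMap (fun x => ((pvH x a2).map (fun r => [r])).getD [])
        = a1.filterMap (fun x => pvH x a2) := by
  intro a1
  induction a1 with
  | nil => rfl
  | cons y ys ih =>
    cases hy : pvH y a2 <;>
      simp [List.flatMap_cons, hy, ih]

-- ===== VERDICT (by name: the statement is the Claim_ definition above) =====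
theorem next_greater_element_in_second_array_spec : Claim_equal_next_greater_element_in_second_array := by
  intro a1 a2 _hdom
  unfold Spec_next_greater_element_in_second_array
  unfold next_greater_element_in_second_array next_greater_element_in_second_array_alt
  simp only []
  rw [PySem.List.foldl_pyRange_zero_pyGetD' a1 0
      (fun acc x => acc ++ pvA_loopJ a2 x (a2.length : Int) (PySem.List.pyRange 0 (a2.length : Int) 1)) [],
    PySem.List.foldl_append_eq_flatMap, List.nil_append]
  have h1 : (fun x => pvA_loopJ a2 x (a2.length : Int) (PySem.List.pyRange 0 (a2.length : Int) 1))
      = (fun x => ((pvH x a2).map (fun r => [r])).getD []) := by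
    funext x
    have := pvA_loopJ_eq a2 x a2.length 0 (by omega)
    simpa using this
  have h2 : (fun x => PySem.Dict.get?
      ((PySem.List.enumerate a2 0).foldl
        (fun d p =>
          if PySem.Dict.contains d p.2 then d
          else PySem.Dict.insert d p.2
            (pvB_firstGreater p.2 (PySem.List.slice a2 (some (p.1 + 1)) none)))
        PySem.Dict.empty) x) = (fun x => pvH x a2) := funext (pvB_lookup a2)
  rw [h1, pv_list_eq, h2]
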